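-- pv_equiv track=rewrite | github.com/rajeshrai248/be-invest | src/be_invest/sources/llm_extract.py | _split_semantic_chunks
-- ===== SOURCE A (Python) =====
-- from typing import List, Optional, Dict, Any
--
-- HEADER_KEYWORDS = [
--     "tarif", "tariff", "fee", "commission", "kosten", "charges", "pricing", "courtage"
-- ]
--
-- def _split_semantic_chunks(text: str, max_len: int, max_chunks: int) -> List[str]:
--     cleaned = text.replace("\r", "")
--     lines = cleaned.split("\n")
--     header_indices: List[int] = []
--     for i, line in enumerate(lines):
--         low = line.lower()
--         if any(k in low for k in HEADER_KEYWORDS) and 0 < len(line) < 160: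
--             header_indices.append(i)
--     if not header_indices:
--         return [text[i : i + max_len] for i in range(0, min(len(text), max_len * max_chunks), max_len)]
--
--     chunks: List[str] = []
--     for idx, start in enumerate(header_indices):
--         end = header_indices[idx + 1] if idx + 1 < len(header_indices) else len(lines)
--         segment = "\n".join(lines[start:end])
--         if len(segment) > max_len:
--             for i in range(0, min(len(segment), max_len * max_chunks), max_len):
--                 chunks.append(segment[i : i + max_len])
--         else:
--             chunks.append(segment)
--         if len(chunks) >= max_chunks:
--             break
--     return chunks
-- ===== SOURCE B (Python) =====
-- from typing import List, Optional
--
-- HEADER_KEYWORDS = [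
--     "tarif", "tariff", "fee", "commission", "kosten", "charges", "pricing", "courtage"
-- ]
--
--
-- def _is_header(line: str) -> bool:
--     low = line.lower()
--     return any(k in low for k in HEADER_KEYWORDS) and 0 < len(line) < 160
--
--
-- def _flush(seg_lines: List[str], chunks: List[str], max_len: int, max_chunks: int) -> None:
--     segment = "\n".join(seg_lines)
--     if len(segment) > max_len:
--         for i in range(0, min(len(segment), max_len * max_chunks), max_len):
--             chunks.append(segment[i : i + max_len])
--     else:
--         chunks.append(segment)
--
--
-- def _split_semantic_chunks(text: str, max_len: int, max_chunks: int) -> List[str]: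
--     # One pass over the lines: skip until the first header, then accumulate the
--     # current segment's lines and flush it whenever the next header starts.
--     lines = text.replace("\r", "").split("\n")
--     chunks: List[str] = []
--     seg: Optional[List[str]] = None  # None until the first header line is seen
--     for line in lines:
--         if _is_header(line):
--             if seg is not None:
--                 _flush(seg, chunks, max_len, max_chunks)
--                 if len(chunks) >= max_chunks:
--                     return chunks
--             seg = [line]
--         elif seg is not None:
--             seg.append(line)
--     if seg is None:
--         # no header anywhere: fall back to fixed-size slices of the raw text
--         return [text[i : i + max_len] for i in range(0, min(len(text), max_len * max_chunks), max_len)]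
--     _flush(seg, chunks, max_len, max_chunks)
--     return chunks
-- ===== Notes on version B (the rewrite author's own statement) =====
-- stated objective: alternative
-- what changed: Replaces the precomputed header_indices list plus index-slice loop by a single pass over the lines that accumulates the current segment's lines and flushes it at each next header (with an early return when max_chunks is reached).
import Mathlib
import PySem

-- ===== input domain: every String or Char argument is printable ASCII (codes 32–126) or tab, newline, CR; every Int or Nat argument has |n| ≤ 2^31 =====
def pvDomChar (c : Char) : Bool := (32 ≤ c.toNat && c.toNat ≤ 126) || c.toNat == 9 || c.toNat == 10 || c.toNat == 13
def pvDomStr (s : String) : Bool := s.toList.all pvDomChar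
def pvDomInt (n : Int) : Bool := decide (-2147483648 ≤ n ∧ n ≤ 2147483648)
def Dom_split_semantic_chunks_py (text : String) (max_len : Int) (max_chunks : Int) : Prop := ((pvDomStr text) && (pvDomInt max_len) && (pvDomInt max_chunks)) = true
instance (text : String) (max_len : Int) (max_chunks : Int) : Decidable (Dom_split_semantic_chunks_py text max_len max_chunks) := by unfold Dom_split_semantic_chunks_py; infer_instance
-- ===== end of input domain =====

-- B replaces A's precomputed header-index list and index-slice loop by a single pass over the
-- lines that accumulates the current segment and flushes it at each next header ("alternative"
-- decomposition, same cost); return values agree wherever A returns (max_len ≠ 0).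

-- ===== PORT A =====
def pvHeaderKeywords : List (List Char) :=
  ["tarif".toList, "tariff".toList, "fee".toList, "commission".toList,
   "kosten".toList, "charges".toList, "pricing".toList, "courtage".toList]

-- A's loop-body condition: any(k in low for k in HEADER_KEYWORDS) and 0 < len(line) < 160
def pvIsHeaderA (line : List Char) : Bool :=
  let low := PySem.Chars.lower line
  (pvHeaderKeywords.any (fun k => PySem.Chars.isIn k low)) &&
    (decide ((0 : Int) < PySem.Chars.len line) && decide (PySem.Chars.len line < 160))

-- A's main loop over header_indices ('end' is the next header index, else len(lines))
def pvLoopA (lines : List (List Char)) (max_len max_chunks : Int) :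
    List Int → List String → List String
  | [], chunks => chunks
  | start :: rest, chunks =>
    let endIdx : Int := match rest with
      | [] => (lines.length : Int)
      | e :: _ => e
    let segment := PySem.Chars.join ['\n'] (PySem.List.slice lines (some start) (some endIdx))
    let chunks' :=
      if PySem.Chars.len segment > max_len then
        chunks ++ (PySem.List.pyRange 0 (min (PySem.Chars.len segment) (max_len * max_chunks)) max_len).map
          (fun i => String.mk (PySem.Chars.slice segment (some i) (some (i + max_len))))
      else chunks ++ [String.mk segment]
    if (chunks'.length : Int) ≥ max_chunks then chunks'
    else pvLoopA lines max_len max_chunks rest chunks'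

def split_semantic_chunks_py (text : String) (max_len : Int) (max_chunks : Int) : List String :=
  let lines := PySem.Chars.splitOn (PySem.Chars.replace text.toList ['\r'] []) ['\n']
  let header_indices := (PySem.List.enumerate lines).foldl
    (fun acc p => if pvIsHeaderA p.2 then acc ++ [p.1] else acc) ([] : List Int)
  if header_indices = [] then
    (PySem.List.pyRange 0 (min (PySem.Str.len text) (max_len * max_chunks)) max_len).map
      (fun i => PySem.Str.slice text (some i) (some (i + max_len)))
  else pvLoopA lines max_len max_chunks header_indices []

-- ===== PORT B =====
def pvIsHeaderB (line : List Char) : Bool :=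
  let low := PySem.Chars.lower line
  (pvHeaderKeywords.any (fun k => PySem.Chars.isIn k low)) &&
    (decide ((0 : Int) < PySem.Chars.len line) && decide (PySem.Chars.len line < 160))

-- B's _flush helper
def pvFlushB (max_len max_chunks : Int) (seg : List (List Char)) (chunks : List String) :
    List String :=
  let segment := PySem.Chars.join ['\n'] seg
  if PySem.Chars.len segment > max_len then
    chunks ++ (PySem.List.pyRange 0 (min (PySem.Chars.len segment) (max_len * max_chunks)) max_len).map
      (fun i => String.mk (PySem.Chars.slice segment (some i) (some (i + max_len))))
  else chunks ++ [String.mk segment]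

-- B's single pass: seg = none until the first header; flush at each next header, early
-- return when max_chunks is reached; after the loop flush the pending segment (or fall back)
def pvGoB (text : String) (max_len max_chunks : Int) :
    List (List Char) → List String → Option (List (List Char)) → List String
  | [], _chunks, none =>
    (PySem.List.pyRange 0 (min (PySem.Str.len text) (max_len * max_chunks)) max_len).map
      (fun i => PySem.Str.slice text (some i) (some (i + max_len)))
  | [], chunks, some s => pvFlushB max_len max_chunks s chunks
  | line :: rest, chunks, seg =>
    if pvIsHeaderB line then
      match seg with
      | some s =>
        let chunks' := pvFlushB max_len max_chunks s chunks
        if (chunks'.length : Int) ≥ max_chunks then chunks'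
        else pvGoB text max_len max_chunks rest chunks' (some [line])
      | none => pvGoB text max_len max_chunks rest chunks (some [line])
    else
      match seg with
      | some s => pvGoB text max_len max_chunks rest chunks (some (s ++ [line]))
      | none => pvGoB text max_len max_chunks rest chunks none

def split_semantic_chunks_py_alt (text : String) (max_len : Int) (max_chunks : Int) : List String :=
  let lines := PySem.Chars.splitOn (PySem.Chars.replace text.toList ['\r'] []) ['\n']
  pvGoB text max_len max_chunks lines [] none

-- ===== PRECONDITION & SPEC =====
-- max_len = 0 makes every path of A hit range(..., 0), which raises ValueError; A returns on
-- every other input, so Pre_ excludes exactly the raising inputs.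
def Pre_split_semantic_chunks_py (text : String) (max_len : Int) (max_chunks : Int) : Prop :=
  max_len ≠ 0
instance (text : String) (max_len : Int) (max_chunks : Int) : Decidable (Pre_split_semantic_chunks_py text max_len max_chunks) := by unfold Pre_split_semantic_chunks_py; infer_instance

def pvWitness_split_semantic_chunks_py : String × Int × Int := ("tarif one\nmore\nfee two", 8, 3)

def Spec_split_semantic_chunks_py (text : String) (max_len : Int) (max_chunks : Int) (out : List String) : Prop := out = split_semantic_chunks_py_alt text max_len max_chunks
instance (text : String) (max_len : Int) (max_chunks : Int) (out : List String) : Decidable (Spec_split_semantic_chunks_py text max_len max_chunks out) := by unfold Spec_split_semantic_chunks_py; infer_instance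

-- ===== CLAIM (what is proved, stated in full; the proofs are below) =====
def Claim_equal_split_semantic_chunks_py : Prop := ∀ (text : String) (max_len : Int) (max_chunks : Int), Dom_split_semantic_chunks_py text max_len max_chunks → Pre_split_semantic_chunks_py text max_len max_chunks → Spec_split_semantic_chunks_py text max_len max_chunks (split_semantic_chunks_py text max_len max_chunks)

-- ===== LEMMAS AND PROOFS =====

-- the list of segments: skip lines before the first header; each segment runs from a header
-- line to just before the next header
def pvSegs : List (List Char) → List (List (List Char))
  | [] => []
  | l :: ls =>
    if pvIsHeaderA l then
      (l :: ls.takeWhile (fun x => !pvIsHeaderA x)) :: pvSegs (ls.dropWhile (fun x => !pvIsHeaderA x))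
    else pvSegs ls
  termination_by ls => ls.length
  decreasing_by
    · simpa using Nat.lt_succ_of_le (List.length_dropWhile_le _ _)
    · simp

-- flushing the segments in order, stopping when max_chunks is reached
def pvLoopSeg (max_len max_chunks : Int) : List (List (List Char)) → List String → List String
  | [], c => c
  | s :: rest, c =>
    let c' := pvFlushB max_len max_chunks s c
    if (c'.length : Int) ≥ max_chunks then c' else pvLoopSeg max_len max_chunks rest c'

-- the ascending list of header positions (as naturals)
def pvNIdxs : List (List Char) → List Nat
  | [] => []
  | l :: ls =>
    if pvIsHeaderA l then 0 :: (pvNIdxs ls).map (· + 1) else (pvNIdxs ls).map (· + 1)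

theorem pvIsHeaderB_eq : pvIsHeaderB = pvIsHeaderA := rfl

theorem pvNIdxs_nil_iff (ls : List (List Char)) :
    pvNIdxs ls = [] ↔ ls.takeWhile (fun x => !pvIsHeaderA x) = ls := by
  induction ls with
  | nil => simp [pvNIdxs]
  | cons l ls ih =>
    by_cases h : pvIsHeaderA l <;> simp [pvNIdxs, List.takeWhile_cons, h, ih]

theorem pvNIdxs_head (ls : List (List Char)) (m : Nat) (rest : List Nat)
    (h : pvNIdxs ls = m :: rest) :
    ls.take m = ls.takeWhile (fun x => !pvIsHeaderA x) ∧
      ls.drop m = ls.dropWhile (fun x => !pvIsHeaderA x) := by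
  induction ls generalizing m rest with
  | nil => simp [pvNIdxs] at h
  | cons l ls ih =>
    by_cases hl : pvIsHeaderA l
    · simp [pvNIdxs, hl] at h
      obtain ⟨rfl, _⟩ := h
      simp [List.takeWhile_cons, List.dropWhile_cons, hl]
    · simp [pvNIdxs, hl] at h
      match hm : pvNIdxs ls with
      | [] => rw [hm] at h; simp at h
      | m' :: rest' =>
        rw [hm] at h
        simp at h
        obtain ⟨rfl, _⟩ := h
        obtain ⟨h1, h2⟩ := ih m' rest' hm
        simp [List.takeWhile_cons, List.dropWhile_cons, hl, h1, h2]

theorem pvSegs_dropWhile (ls : List (List Char)) :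
    pvSegs (ls.dropWhile (fun x => !pvIsHeaderA x)) = pvSegs ls := by
  induction ls with
  | nil => simp
  | cons l ls ih =>
    by_cases h : pvIsHeaderA l
    · simp [List.dropWhile_cons, h]
    · simp [List.dropWhile_cons, h, ih, pvSegs]

theorem pvSegs_nil_iff (ls : List (List Char)) : pvSegs ls = [] ↔ pvNIdxs ls = [] := by
  induction ls with
  | nil => simp [pvSegs, pvNIdxs]
  | cons l ls ih =>
    by_cases h : pvIsHeaderA l <;> simp [pvSegs, pvNIdxs, h, ih]

-- B's pass equals flushing the explicit segment list
theorem pvGoB_some (text : String) (ml mc : Int) (ls : List (List Char))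
    (s : List (List Char)) (chunks : List String) :
    pvGoB text ml mc ls chunks (some s) =
      pvLoopSeg ml mc ((s ++ ls.takeWhile (fun x => !pvIsHeaderA x))
        :: pvSegs (ls.dropWhile (fun x => !pvIsHeaderA x))) chunks := by
  induction ls generalizing s chunks with
  | nil =>
    simp only [pvGoB, pvLoopSeg, List.takeWhile_nil, List.dropWhile_nil, List.append_nil, pvSegs]
    split <;> rfl
  | cons l ls ih =>
    by_cases h : pvIsHeaderA l
    · have htw : (l :: ls).takeWhile (fun x => !pvIsHeaderA x) = [] := by simp [h]
      have hdw : (l :: ls).dropWhile (fun x => !pvIsHeaderA x) = l :: ls := by simp [h]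
      have hsegs : pvSegs (l :: ls) =
          (l :: ls.takeWhile (fun x => !pvIsHeaderA x))
            :: pvSegs (ls.dropWhile (fun x => !pvIsHeaderA x)) := by
        simp [pvSegs, h]
      rw [htw, hdw, hsegs]
      simp only [pvGoB, pvIsHeaderB_eq, h, if_pos, List.append_nil]
      show (if _ then _ else pvGoB text ml mc ls (pvFlushB ml mc s chunks) (some [l])) = _
      simp only [pvLoopSeg]
      split
      · rfl
      · rw [ih]; rfl
    · have htw : (l :: ls).takeWhile (fun x => !pvIsHeaderA x) =
          l :: ls.takeWhile (fun x => !pvIsHeaderA x) := by simp [h]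
      have hdw : (l :: ls).dropWhile (fun x => !pvIsHeaderA x) =
          ls.dropWhile (fun x => !pvIsHeaderA x) := by simp [h]
      rw [htw, hdw]
      simp only [pvGoB, pvIsHeaderB_eq, h, Bool.false_eq_true, if_neg, not_false_eq_true]
      rw [ih]
      simp

theorem pvGoB_none (text : String) (ml mc : Int) (ls : List (List Char)) (chunks : List String) :
    pvGoB text ml mc ls chunks none =
      if pvSegs ls = [] then
        (PySem.List.pyRange 0 (min (PySem.Str.len text) (ml * mc)) ml).map
          (fun i => PySem.Str.slice text (some i) (some (i + ml)))
      else pvLoopSeg ml mc (pvSegs ls) chunks := by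
  induction ls generalizing chunks with
  | nil => simp [pvGoB, pvSegs]
  | cons l ls ih =>
    by_cases h : pvIsHeaderA l
    · simp only [pvGoB, pvIsHeaderB_eq, h, if_pos]
      rw [pvGoB_some]
      have : pvSegs (l :: ls) =
          (l :: ls.takeWhile (fun x => !pvIsHeaderA x))
            :: pvSegs (ls.dropWhile (fun x => !pvIsHeaderA x)) := by
        simp [pvSegs, h]
      rw [this]
      simp
    · simp only [pvGoB, pvIsHeaderB_eq, h, Bool.false_eq_true, if_neg, not_false_eq_true]
      rw [ih]
      have : pvSegs (l :: ls) = pvSegs ls := by simp [pvSegs, h]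
      rw [this]

-- A's header_indices fold computes the positions
theorem pvFold_enumerate (ls : List (List Char)) (s : Int) (acc : List Int) :
    (PySem.List.enumerate ls s).foldl
        (fun acc p => if pvIsHeaderA p.2 then acc ++ [p.1] else acc) acc =
      acc ++ (pvNIdxs ls).map (fun n : Nat => s + (n : Int)) := by
  induction ls generalizing s acc with
  | nil => simp [PySem.List.enumerate_nil, pvNIdxs]
  | cons l ls ih =>
    rw [PySem.List.enumerate_cons, List.foldl_cons]
    by_cases h : pvIsHeaderA l
    · simp only [h, if_pos]
      rw [ih]
      simp only [pvNIdxs, h, if_pos, List.map_cons, List.map_map, List.append_assoc,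
        List.cons_append, List.nil_append, Nat.cast_zero, add_zero]
      congr 2
      apply List.map_congr_left
      intro n _
      simp only [Function.comp_apply]
      push_cast
      ring
    · simp only [h, Bool.false_eq_true, if_neg, not_false_eq_true]
      rw [ih]
      simp only [pvNIdxs, h, Bool.false_eq_true, if_neg, not_false_eq_true, List.map_map]
      congr 1
      apply List.map_congr_left
      intro n _
      simp only [Function.comp_apply]
      push_cast
      ring

-- dropping the shared head line shifts A's loop by one
theorem pvLoopA_shift (l : List Char) (ls : List (List Char)) (ml mc : Int)
    (ns : List Nat) (chunks : List String) :
    pvLoopA (l :: ls) ml mc (ns.map (fun n : Nat => (n : Int) + 1)) chunks =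
      pvLoopA ls ml mc (ns.map (fun n : Nat => (n : Int))) chunks := by
  induction ns generalizing chunks with
  | nil => rfl
  | cons n rest ih =>
    conv_lhs => rw [List.map_cons, pvLoopA.eq_def]
    conv_rhs => rw [List.map_cons, pvLoopA.eq_def]
    simp only []
    cases rest with
    | nil =>
      simp only [List.map_nil]
      rw [show PySem.List.slice (l :: ls) (some ((n : Int) + 1)) (some (((l :: ls).length : Nat) : Int)) =
          PySem.List.slice ls (some ((n : Nat) : Int)) (some ((ls.length : Nat) : Int)) from by
        rw [show ((n : Int) + 1) = ((n + 1 : Nat) : Int) by push_cast; ring,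
          PySem.List.slice_natCast, PySem.List.slice_natCast]
        simp only [List.drop_succ_cons, List.length_cons, Nat.add_sub_add_right]]
      split
      · rfl
      · simp only [pvLoopA.eq_def]
    | cons e rest' =>
      simp only [List.map_cons]
      rw [show PySem.List.slice (l :: ls) (some ((n : Int) + 1)) (some ((e : Int) + 1)) =
          PySem.List.slice ls (some ((n : Nat) : Int)) (some ((e : Nat) : Int)) from by
        rw [show ((n : Int) + 1) = ((n + 1 : Nat) : Int) by push_cast; ring,
          show ((e : Int) + 1) = ((e + 1 : Nat) : Int) by push_cast; ring,
          PySem.List.slice_natCast, PySem.List.slice_natCast]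
        simp only [List.drop_succ_cons, Nat.add_sub_add_right]]
      split <;> split <;> first | rfl | exact ih _

-- A's loop over the header indices equals flushing the explicit segment list
theorem pvLoopA_eq_loopSeg (ml mc : Int) (ls : List (List Char)) (chunks : List String) :
    pvLoopA ls ml mc ((pvNIdxs ls).map (fun n : Nat => (n : Int))) chunks =
      pvLoopSeg ml mc (pvSegs ls) chunks := by
  induction ls generalizing chunks with
  | nil => simp [pvNIdxs, pvSegs, pvLoopA, pvLoopSeg]
  | cons l ls ih =>
    have hmapmap : ((pvNIdxs ls).map (· + 1)).map (fun n : Nat => (n : Int)) =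
        (pvNIdxs ls).map (fun n : Nat => (n : Int) + 1) := by
      rw [List.map_map]
      apply List.map_congr_left
      intro n _
      simp only [Function.comp_apply]
      push_cast; ring
    by_cases h : pvIsHeaderA l
    · rw [show pvNIdxs (l :: ls) = 0 :: (pvNIdxs ls).map (· + 1) by simp [pvNIdxs, h]]
      rw [show pvSegs (l :: ls) =
          (l :: ls.takeWhile (fun x => !pvIsHeaderA x))
            :: pvSegs (ls.dropWhile (fun x => !pvIsHeaderA x)) by simp [pvSegs, h]]
      simp only [List.map_cons]
      rw [hmapmap]
      conv_lhs => rw [pvLoopA.eq_def]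
      conv_rhs => rw [pvLoopSeg.eq_def]
      simp only []
      rw [show PySem.List.slice (l :: ls) (some ((0 : Nat) : Int))
          (some (match (pvNIdxs ls).map (fun n : Nat => (n : Int) + 1) with
            | [] => (((l :: ls).length : Nat) : Int)
            | e :: _ => e)) = l :: ls.takeWhile (fun x => !pvIsHeaderA x) from by
        match hm : pvNIdxs ls with
        | [] =>
          simp only [List.map_nil]
          rw [PySem.List.slice_natCast]
          simp [(pvNIdxs_nil_iff ls).mp hm]
        | m :: rest =>
          simp only [List.map_cons]
          rw [show ((m : Int) + 1) = ((m + 1 : Nat) : Int) by push_cast; ring,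
            PySem.List.slice_natCast]
          simp [(pvNIdxs_head ls m rest hm).1]]
      rw [show (if PySem.Chars.len (PySem.Chars.join ['\n'] (l :: List.takeWhile (fun x => !pvIsHeaderA x) ls)) > ml then
            chunks ++ (PySem.List.pyRange 0 (min (PySem.Chars.len (PySem.Chars.join ['\n'] (l :: List.takeWhile (fun x => !pvIsHeaderA x) ls))) (ml * mc)) ml).map
              (fun i => String.mk (PySem.Chars.slice (PySem.Chars.join ['\n'] (l :: List.takeWhile (fun x => !pvIsHeaderA x) ls)) (some i) (some (i + ml))))
          else chunks ++ [String.mk (PySem.Chars.join ['\n'] (l :: List.takeWhile (fun x => !pvIsHeaderA x) ls))]) =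
          pvFlushB ml mc (l :: List.takeWhile (fun x => !pvIsHeaderA x) ls) chunks from rfl]
      split
      · rfl
      · rw [pvLoopA_shift, ih, pvSegs_dropWhile]
    · rw [show pvNIdxs (l :: ls) = (pvNIdxs ls).map (· + 1) by simp [pvNIdxs, h]]
      rw [show pvSegs (l :: ls) = pvSegs ls by simp [pvSegs, h]]
      rw [hmapmap, pvLoopA_shift, ih]

-- ===== VERDICT (by name: the statement is the Claim_ definition above) =====
theorem split_semantic_chunks_py_spec : Claim_equal_split_semantic_chunks_py := by
  intro text ml mc _hdom _hpre
  unfold Spec_split_semantic_chunks_py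
  unfold split_semantic_chunks_py split_semantic_chunks_py_alt
  simp only []
  set lines := PySem.Chars.splitOn (PySem.Chars.replace text.toList ['\r'] []) ['\n'] with hl
  rw [pvGoB_none]
  rw [show (PySem.List.enumerate lines).foldl
      (fun acc p => if pvIsHeaderA p.2 then acc ++ [p.1] else acc) ([] : List Int) =
      (pvNIdxs lines).map (fun n : Nat => (n : Int)) from by
    rw [pvFold_enumerate lines 0 []]
    rw [List.nil_append]
    apply List.map_congr_left
    intro n _
    ring]
  by_cases hnil : pvNIdxs lines = []
  · rw [if_pos (by simp [hnil]), if_pos ((pvSegs_nil_iff lines).mpr hnil)]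
  · rw [if_neg (by simpa using hnil),
      if_neg (fun h => hnil ((pvSegs_nil_iff lines).mp h))]
    exact pvLoopA_eq_loopSeg ml mc lines []
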